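-- pv_equiv track=rewrite | github.com/alihaidar2950/cifi | cifi/preprocessor.py | _extract_error_region
-- ===== SOURCE A (Python) =====
-- _ERROR_MARKERS = [
--     "error",
--     "failed",
--     "fail",
--     "exception",
--     "traceback (most recent call last)",
--     "assertionerror",
--     "typeerror",
--     "valueerror",
--     "keyerror",
--     "attributeerror",
--     "modulenotfounderror",
--     "importerror",
--     "syntaxerror",
--     "indentationerror",
--     "fatal",
--     "panic",
--     "npm err!",
--     "cargo error",
-- ]
--
-- def _extract_error_region(logs: str) -> str:
--     """Extract the region around errors from logs."""
--     lines = logs.splitlines()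
--     error_indices: list[int] = []
--
--     for i, line in enumerate(lines):
--         lower = line.lower()
--         if any(marker.lower() in lower for marker in _ERROR_MARKERS):
--             error_indices.append(i)
--
--     if not error_indices:
--         # No clear error markers — return last 100 lines as fallback
--         return "\n".join(lines[-100:])
--
--     # Expand around each error line with context (5 lines before, 10 after)
--     selected: set[int] = set()
--     for idx in error_indices:
--         start = max(0, idx - 5)
--         end = min(len(lines), idx + 11)
--         selected.update(range(start, end))
--
--     return "\n".join(lines[i] for i in sorted(selected))
-- ===== SOURCE B (Python) =====
-- _ERROR_MARKERS = [
--     "error",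
--     "failed",
--     "fail",
--     "exception",
--     "traceback (most recent call last)",
--     "assertionerror",
--     "typeerror",
--     "valueerror",
--     "keyerror",
--     "attributeerror",
--     "modulenotfounderror",
--     "importerror",
--     "syntaxerror",
--     "indentationerror",
--     "fatal",
--     "panic",
--     "npm err!",
--     "cargo error",
-- ]
--
--
-- def _extract_error_region(logs: str) -> str:
--     """Extract the region around errors from logs."""
--     lines = logs.splitlines()
--     error_indices = [
--         i
--         for i, line in enumerate(lines)
--         if any(marker in line.lower() for marker in _ERROR_MARKERS)
--     ]
--
--     if not error_indices:
--         # No clear error markers — return last 100 lines as fallback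
--         return "\n".join(lines[-100:])
--
--     # Keep each line that lies within 5 before / 10 after some error line:
--     # one pass over the lines in order, no index set and no sort needed.
--     return "\n".join(
--         line
--         for i, line in enumerate(lines)
--         if any(idx - 5 <= i <= idx + 10 for idx in error_indices)
--     )
-- ===== Notes on version B (the rewrite author's own statement) =====
-- stated objective: simpler
-- what changed: Instead of expanding each error index into a set of line indices and then sorting the set, B filters the lines in one ordered pass, keeping each line whose index lies within 5 before / 10 after some error index; the set and the sort disappear.
import Mathlib
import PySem

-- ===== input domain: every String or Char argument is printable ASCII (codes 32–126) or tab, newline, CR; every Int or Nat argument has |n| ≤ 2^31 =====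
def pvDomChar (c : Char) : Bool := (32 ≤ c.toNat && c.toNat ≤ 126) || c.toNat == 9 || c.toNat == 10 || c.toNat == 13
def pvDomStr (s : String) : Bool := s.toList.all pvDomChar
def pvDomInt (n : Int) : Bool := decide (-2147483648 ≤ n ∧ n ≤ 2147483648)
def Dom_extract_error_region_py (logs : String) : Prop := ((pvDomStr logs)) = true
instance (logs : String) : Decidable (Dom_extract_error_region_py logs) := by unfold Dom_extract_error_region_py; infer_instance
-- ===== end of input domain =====

-- B replaces A's "expand each error index into a set of indices, then sort it" by a single
-- ordered filter over the lines (keep a line iff its index is within 5 before / 10 after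
-- some error index); same marker scan, same last-100-lines fallback. Objective: simpler.

def pvMarkers : List String := [
  "error", "failed", "fail", "exception", "traceback (most recent call last)",
  "assertionerror", "typeerror", "valueerror", "keyerror", "attributeerror",
  "modulenotfounderror", "importerror", "syntaxerror", "indentationerror",
  "fatal", "panic", "npm err!", "cargo error"]

-- ===== PORT A =====
-- (Python's 'lower = line.lower()' is inlined at its single use: same intermediate value)
def extract_error_region_py (logs : String) : String :=
  let lines := PySem.Str.splitlines logs
  let error_indices : List Int :=
    (PySem.List.enumerate lines 0).foldl (fun acc p =>
      if pvMarkers.any (fun marker => PySem.Str.isIn (PySem.Str.lower marker) (PySem.Str.lower p.2))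
      then acc ++ [p.1] else acc) []
  if error_indices = [] then
    PySem.Str.join "\n" (PySem.List.slice lines (some (-100)) none)
  else
    let selected : PySem.Set Int :=
      error_indices.foldl (fun s idx =>
        PySem.Set.update s
          (PySem.List.pyRange (max 0 (idx - 5)) (min (lines.length : Int) (idx + 11)) 1))
        PySem.Set.empty
    PySem.Str.join "\n"
      ((PySem.List.sorted selected (fun x => x) false).map
        (fun i => PySem.List.pyGetD lines i ""))

-- ===== PORT B =====
def extract_error_region_py_alt (logs : String) : String :=
  let lines := PySem.Str.splitlines logs
  let error_indices : List Int :=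
    ((PySem.List.enumerate lines 0).filter (fun p =>
      pvMarkers.any (fun marker => PySem.Str.isIn marker (PySem.Str.lower p.2)))).map (·.1)
  if error_indices = [] then
    PySem.Str.join "\n" (PySem.List.slice lines (some (-100)) none)
  else
    PySem.Str.join "\n"
      (((PySem.List.enumerate lines 0).filter (fun p =>
        error_indices.any (fun idx => idx - 5 ≤ p.1 && p.1 ≤ idx + 10))).map (·.2))

-- ===== PRECONDITION & SPEC =====
def Spec_extract_error_region_py (logs : String) (out : String) : Prop := out = extract_error_region_py_alt logs
instance (logs : String) (out : String) : Decidable (Spec_extract_error_region_py logs out) := by unfold Spec_extract_error_region_py; infer_instance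

-- ===== CLAIM (what is proved, stated in full; the proofs are below) =====
def Claim_equal_extract_error_region_py : Prop := ∀ (logs : String), Dom_extract_error_region_py logs → Spec_extract_error_region_py logs (extract_error_region_py logs)

-- ===== LEMMAS AND PROOFS =====

-- every literal in pvMarkers is already lowercase
theorem markers_lower : ∀ m ∈ pvMarkers, PySem.Str.lower m = m := by decide

-- A's append-loop over the enumerated lines builds exactly B's filtered index list
theorem errs_eq (lines : List String) :
    (PySem.List.enumerate lines 0).foldl (fun acc p =>
      if pvMarkers.any (fun marker => PySem.Str.isIn (PySem.Str.lower marker) (PySem.Str.lower p.2))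
      then acc ++ [p.1] else acc) [] =
    ((PySem.List.enumerate lines 0).filter (fun p =>
      pvMarkers.any (fun marker => PySem.Str.isIn marker (PySem.Str.lower p.2)))).map (·.1) := by
  have h1 := PySem.List.foldl_congr_mem
    (l := PySem.List.enumerate lines 0) (init := ([] : List Int))
    (f := fun acc (p : Int × String) =>
      if pvMarkers.any (fun marker => PySem.Str.isIn (PySem.Str.lower marker) (PySem.Str.lower p.2))
      then acc ++ [p.1] else acc)
    (g := fun acc p => if pvMarkers.any (fun marker => PySem.Str.isIn marker (PySem.Str.lower p.2))
      then acc ++ [p.1] else acc)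
    (fun acc p _ => by
      beta_reduce
      rw [PySem.List.any_congr_mem (fun m hm => by rw [markers_lower m hm])])
  rw [h1, PySem.List.foldl_append_if
    (p := fun p : Int × String => pvMarkers.any (fun marker => PySem.Str.isIn marker (PySem.Str.lower p.2)))
    (f := fun p : Int × String => p.1), List.nil_append]

theorem mem_foldl_update {α β : Type} [BEq α] [LawfulBEq α] (l : List β) (g : β → List α)
    (s : PySem.Set α) (y : α) :
    y ∈ l.foldl (fun s b => PySem.Set.update s (g b)) s ↔ y ∈ s ∨ ∃ b ∈ l, y ∈ g b := by
  induction l generalizing s with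
  | nil => simp
  | cons b t ih =>
    simp [List.foldl_cons, ih, PySem.Set.mem_update]
    tauto

theorem nodup_foldl_update {α β : Type} [BEq α] [LawfulBEq α] (l : List β) (g : β → List α)
    (s : PySem.Set α) (hs : s.Nodup) :
    (l.foldl (fun s b => PySem.Set.update s (g b)) s).Nodup := by
  induction l generalizing s with
  | nil => exact hs
  | cons b t ih => exact ih _ (PySem.Set.nodup_update _ _ hs)

-- sorting A's selected-index set yields the indices 0..n-1 filtered by B's proximity test
theorem sel_sorted (n : Int) (E : List Int) :
    PySem.List.sorted (E.foldl (fun s idx => PySem.Set.update s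
        (PySem.List.pyRange (max 0 (idx - 5)) (min n (idx + 11)) 1)) PySem.Set.empty)
      (fun x => x) false
    = (PySem.List.pyRange 0 n 1).filter
        (fun j => E.any (fun idx => idx - 5 ≤ j && j ≤ idx + 10)) := by
  apply PySem.List.sorted_eq_of_perm_of_pairwise_lt
  · apply (List.perm_ext_iff_of_nodup
      (List.Nodup.filter _ (PySem.List.nodup_pyRange_one 0 n))
      (nodup_foldl_update E _ _ (by simp [PySem.Set.empty]))).2
    intro x
    rw [List.mem_filter, mem_foldl_update]
    simp only [PySem.Set.empty, List.not_mem_nil, false_or, PySem.List.mem_pyRange_one,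
      List.any_eq_true, decide_eq_true_eq, Bool.and_eq_true]
    constructor
    · rintro ⟨⟨hx0, hxn⟩, idx, hidx, h1, h2⟩
      exact ⟨idx, hidx, by omega⟩
    · rintro ⟨idx, hidx, hx1, hx2⟩
      exact ⟨by omega, idx, hidx, by omega⟩
  · exact List.Pairwise.filter _ (PySem.List.pairwise_lt_pyRange_one 0 n)

theorem main_lemma (logs : String) :
    extract_error_region_py logs = extract_error_region_py_alt logs := by
  unfold extract_error_region_py extract_error_region_py_alt
  simp only [errs_eq]
  set lines := PySem.Str.splitlines logs with hlines
  set E : List Int := ((PySem.List.enumerate lines 0).filter (fun p =>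
      pvMarkers.any (fun marker => PySem.Str.isIn marker (PySem.Str.lower p.2)))).map (·.1) with hE
  by_cases hemp : E = []
  · simp [hemp]
  · simp only [if_neg hemp]
    congr 1
    rw [sel_sorted]
    rw [PySem.List.enumerate_eq_map_pyRange (d := "")]
    simp only [List.filter_map, List.map_map]
    rfl

-- ===== VERDICT (by name: the statement is the Claim_ definition above) =====
theorem extract_error_region_py_spec : Claim_equal_extract_error_region_py := by
  intro logs _
  unfold Spec_extract_error_region_py
  exact main_lemma logs
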